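-- pv_equiv track=rewrite | github.com/NMerz/chessy | amazon.py | get_white_black_cols
-- ===== SOURCE A (Python) =====
-- def get_white_black_cols(header_row, table_rows):
--     white_cols = []
--     black_cols = []
--     for col_index, col in enumerate(header_row):
--         if col == None:
--             continue
--         col = col.replace("'", "")
--         if "white" in col.lower():
--             white_cols.append(col_index)
--         if "blac" in col.lower():
--             black_cols.append(col_index)
--
--     if (
--         len(white_cols) == 0
--         and len(black_cols) == 0
--         and table_rows
--         and table_rows[0]
--         and len(table_rows[0]) == 6
--     ):
--         return get_white_black_cols(
--             header_row=[
--                 "#",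
--                 "white",
--                 "black",
--                 "#",
--                 "white",
--                 "black",
--             ],  # guess the most common
--             table_rows=table_rows,
--         )
--     if (
--         len(white_cols) == 0
--         and len(black_cols) == 0
--         and table_rows
--         and table_rows[0]
--         and len(table_rows[0]) == 4
--     ):
--         return get_white_black_cols(
--             header_row=[
--                 "white",
--                 "black",
--                 "white",
--                 "black",
--             ],  # guess the most common
--             table_rows=table_rows,
--         )
--
--     return white_cols, black_cols
-- ===== SOURCE B (Python) =====
-- def _cleaned(header_row):
--     return [(i, c.replace("'", "").lower()) for i, c in enumerate(header_row) if c is not None]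
--
--
-- def get_white_black_cols(header_row, table_rows):
--     cleaned = _cleaned(header_row)
--     white_cols = [i for i, c in cleaned if "white" in c]
--     black_cols = [i for i, c in cleaned if "blac" in c]
--     if not white_cols and not black_cols and table_rows and table_rows[0]:
--         n = len(table_rows[0])
--         if n == 6:
--             return [1, 4], [2, 5]
--         if n == 4:
--             return [0, 2], [1, 3]
--     return white_cols, black_cols
-- ===== Notes on version B (the rewrite author's own statement) =====
-- stated objective: simpler
-- what changed: B replaces A's self-recursion on hard-coded fallback headers by inlining the constant results ([1,4],[2,5]) / ([0,2],[1,3]) for the 6- and 4-column guesses, and builds the white/black index lists with comprehensions over a single cleaned header instead of a loop with two conditional appends.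
import Mathlib
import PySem

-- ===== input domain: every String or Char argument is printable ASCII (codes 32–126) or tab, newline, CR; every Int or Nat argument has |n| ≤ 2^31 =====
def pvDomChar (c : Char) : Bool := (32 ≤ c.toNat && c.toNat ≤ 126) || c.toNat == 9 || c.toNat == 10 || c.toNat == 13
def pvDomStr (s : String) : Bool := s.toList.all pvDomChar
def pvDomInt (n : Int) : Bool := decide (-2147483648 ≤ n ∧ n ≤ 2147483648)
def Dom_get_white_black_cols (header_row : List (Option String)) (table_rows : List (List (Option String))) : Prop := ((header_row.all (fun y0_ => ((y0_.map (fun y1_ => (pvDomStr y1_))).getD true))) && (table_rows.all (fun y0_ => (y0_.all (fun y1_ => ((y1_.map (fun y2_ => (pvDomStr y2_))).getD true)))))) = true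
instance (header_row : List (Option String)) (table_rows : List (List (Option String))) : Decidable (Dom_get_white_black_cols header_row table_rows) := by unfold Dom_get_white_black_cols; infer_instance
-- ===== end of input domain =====

-- B replaces A's self-recursion on hard-coded default headers by the inlined constant
-- results for the 6- and 4-column guesses, and builds the two index lists by
-- comprehensions over one cleaned header instead of a two-append loop (objective: simpler).

-- ===== PORT A =====
-- the enumerate loop of A: appends col_index to white/black accumulators
def gwbScanA (header_row : List (Option String)) : List Int × List Int :=
  (PySem.List.enumerate header_row).foldl
    (fun (st : List Int × List Int) p =>
      match p.2 with
      | none => st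
      | some col =>
        let c := PySem.Str.replace col "'" ""
        let w := if PySem.Str.isIn "white" (PySem.Str.lower c) then st.1 ++ [p.1] else st.1
        let b := if PySem.Str.isIn "blac" (PySem.Str.lower c) then st.2 ++ [p.1] else st.2
        (w, b))
    ([], [])

-- fuel makes the self-recursion structurally total; depth is at most 2 on every input
-- (the recursive call's default header always yields nonempty white_cols), so fuel 2 is exact
def gwbAuxA : Nat → List (Option String) → List (List (Option String)) → List Int × List Int
  | 0, _, _ => ([], [])
  | fuel+1, header_row, table_rows =>
    let p := gwbScanA header_row
    if p.1.length == 0 && p.2.length == 0 && !table_rows.isEmpty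
        && !(table_rows.headD []).isEmpty && (table_rows.headD []).length == 6 then
      gwbAuxA fuel [some "#", some "white", some "black", some "#", some "white", some "black"] table_rows
    else if p.1.length == 0 && p.2.length == 0 && !table_rows.isEmpty
        && !(table_rows.headD []).isEmpty && (table_rows.headD []).length == 4 then
      gwbAuxA fuel [some "white", some "black", some "white", some "black"] table_rows
    else
      p

def get_white_black_cols (header_row : List (Option String)) (table_rows : List (List (Option String))) : List Int × List Int :=
  gwbAuxA 2 header_row table_rows

-- ===== PORT B =====
def gwbCleaned (header_row : List (Option String)) : List (Int × String) :=
  (PySem.List.enumerate header_row).filterMap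
    (fun p => p.2.map (fun c => (p.1, PySem.Str.lower (PySem.Str.replace c "'" ""))))

def get_white_black_cols_alt (header_row : List (Option String)) (table_rows : List (List (Option String))) : List Int × List Int :=
  let cleaned := gwbCleaned header_row
  let white_cols := (cleaned.filter (fun p => PySem.Str.isIn "white" p.2)).map (·.1)
  let black_cols := (cleaned.filter (fun p => PySem.Str.isIn "blac" p.2)).map (·.1)
  if white_cols.isEmpty && black_cols.isEmpty && !table_rows.isEmpty && !(table_rows.headD []).isEmpty then
    if (table_rows.headD []).length == 6 then ([1, 4], [2, 5])
    else if (table_rows.headD []).length == 4 then ([0, 2], [1, 3])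
    else (white_cols, black_cols)
  else (white_cols, black_cols)

-- ===== PRECONDITION & SPEC =====
def Spec_get_white_black_cols (header_row : List (Option String)) (table_rows : List (List (Option String))) (out : List Int × List Int) : Prop := out = get_white_black_cols_alt header_row table_rows
instance (header_row : List (Option String)) (table_rows : List (List (Option String))) (out : List Int × List Int) : Decidable (Spec_get_white_black_cols header_row table_rows out) := by unfold Spec_get_white_black_cols; infer_instance

-- ===== CLAIM (what is proved, stated in full; the proofs are below) =====
def Claim_equal_get_white_black_cols : Prop := ∀ (header_row : List (Option String)) (table_rows : List (List (Option String))), Dom_get_white_black_cols header_row table_rows → Spec_get_white_black_cols header_row table_rows (get_white_black_cols header_row table_rows)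

-- ===== LEMMAS AND PROOFS =====

-- the white/black lists B computes, as functions of the cleaned header
def bWhite (header_row : List (Option String)) : List Int :=
  ((gwbCleaned header_row).filter (fun p => PySem.Str.isIn "white" p.2)).map (·.1)
def bBlack (header_row : List (Option String)) : List Int :=
  ((gwbCleaned header_row).filter (fun p => PySem.Str.isIn "blac" p.2)).map (·.1)

-- A's append loop, run from any accumulator, appends exactly B's comprehension results
theorem gwbScanA_go (l : List (Int × Option String)) (w0 b0 : List Int) :
    l.foldl
      (fun (st : List Int × List Int) p =>
        match p.2 with
        | none => st
        | some col =>
          let c := PySem.Str.replace col "'" ""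
          let w := if PySem.Str.isIn "white" (PySem.Str.lower c) then st.1 ++ [p.1] else st.1
          let b := if PySem.Str.isIn "blac" (PySem.Str.lower c) then st.2 ++ [p.1] else st.2
          (w, b))
      (w0, b0)
    = (w0 ++ ((l.filterMap (fun p => p.2.map (fun c => (p.1, PySem.Str.lower (PySem.Str.replace c "'" ""))))).filter (fun p => PySem.Str.isIn "white" p.2)).map (·.1),
       b0 ++ ((l.filterMap (fun p => p.2.map (fun c => (p.1, PySem.Str.lower (PySem.Str.replace c "'" ""))))).filter (fun p => PySem.Str.isIn "blac" p.2)).map (·.1)) := by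
  induction l generalizing w0 b0 with
  | nil => simp
  | cons x xs ih =>
    obtain ⟨i, oc⟩ := x
    cases oc with
    | none => simpa using ih w0 b0
    | some col =>
      simp only [List.foldl_cons, List.filterMap_cons, Option.map_some, List.filter_cons]
      rw [ih]
      split_ifs <;> simp_all

theorem gwbScanA_eq (h : List (Option String)) : gwbScanA h = (bWhite h, bBlack h) := by
  unfold gwbScanA bWhite bBlack gwbCleaned
  simpa using gwbScanA_go (PySem.List.enumerate h) [] []

theorem length_beq_zero_eq_isEmpty (l : List Int) : (l.length == 0) = l.isEmpty := by
  cases l <;> simp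

-- the white/black lists of the two default headers, evaluated
theorem bWhite_hdr6 : bWhite [some "#", some "white", some "black", some "#", some "white", some "black"] = [1, 4] := by decide
theorem bBlack_hdr6 : bBlack [some "#", some "white", some "black", some "#", some "white", some "black"] = [2, 5] := by decide
theorem bWhite_hdr4 : bWhite [some "white", some "black", some "white", some "black"] = [0, 2] := by decide
theorem bBlack_hdr4 : bBlack [some "white", some "black", some "white", some "black"] = [1, 3] := by decide

-- ===== VERDICT (by name: the statement is the Claim_ definition above) =====
theorem get_white_black_cols_spec : Claim_equal_get_white_black_cols := by
  intro h t _
  unfold Spec_get_white_black_cols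
  have halt : get_white_black_cols_alt h t =
      (if ((bWhite h).isEmpty && (bBlack h).isEmpty && !t.isEmpty && !(t.headD []).isEmpty) then
        (if ((t.headD []).length == 6) then (([1, 4] : List Int), ([2, 5] : List Int))
         else if ((t.headD []).length == 4) then ([0, 2], [1, 3])
         else (bWhite h, bBlack h))
      else (bWhite h, bBlack h)) := rfl
  rw [halt]
  show gwbAuxA 2 h t = _
  simp only [gwbAuxA, gwbScanA_eq, bWhite_hdr6, bBlack_hdr6, bWhite_hdr4, bBlack_hdr4]
  simp only [length_beq_zero_eq_isEmpty]
  generalize bWhite h = w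
  generalize bBlack h = b
  simp only [List.headD_eq_head?_getD]
  by_cases hw : w.isEmpty <;> by_cases hb : b.isEmpty <;>
    by_cases ht : t.isEmpty <;> by_cases h0 : (t.head?.getD []).isEmpty <;>
    by_cases h6 : (t.head?.getD []).length = 6 <;> by_cases h4 : (t.head?.getD []).length = 4 <;>
    simp_all
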